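-- pv_equiv track=rewrite | github.com/crijumubu/CalculadoraFlsmVlsm | Calculadora IPv4 FLSM VLSM.py | Ajustar_direccion
-- ===== SOURCE A (Python) =====
-- def Ajustar_direccion(direccion):
--     direccion += '.'
--     direccion_ajustada = ''
--     octeto_binario = ''
--     for i in direccion:
--         if (i != '.'):
--             octeto_binario += i
--         else:
--             if (len(octeto_binario) != 8):
--                 cadena_ceros = ''
--                 for i in range(0, 8 - len(octeto_binario)):
--                     cadena_ceros += '0'
--                 direccion_ajustada += cadena_ceros + octeto_binario + '.'
--             else:
--                 direccion_ajustada += octeto_binario + '.'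
--             octeto_binario = ''
--
--     return direccion_ajustada[:-1]
-- ===== SOURCE B (Python) =====
-- def Ajustar_direccion(direccion):
--     return '.'.join(octeto.rjust(8, '0') for octeto in direccion.split('.'))
-- ===== Notes on version B (the rewrite author's own statement) =====
-- stated objective: idiomatic
-- what changed: Replaces the character-by-character state machine (sentinel trailing dot, inner zero-prepending loop, final trim) with splitting the address on dots, left-padding each octet to 8 characters with zeros, and rejoining.
import Mathlib
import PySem

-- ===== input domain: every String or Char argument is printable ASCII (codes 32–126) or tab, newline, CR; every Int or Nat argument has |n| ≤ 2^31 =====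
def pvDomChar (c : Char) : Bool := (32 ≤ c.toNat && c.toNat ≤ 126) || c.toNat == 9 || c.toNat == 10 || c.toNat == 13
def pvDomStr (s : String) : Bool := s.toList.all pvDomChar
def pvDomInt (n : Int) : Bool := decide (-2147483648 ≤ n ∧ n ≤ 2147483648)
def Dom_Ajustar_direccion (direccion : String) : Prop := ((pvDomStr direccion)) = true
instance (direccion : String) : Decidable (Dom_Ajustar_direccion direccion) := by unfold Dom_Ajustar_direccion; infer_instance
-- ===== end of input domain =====

-- B replaces A's per-character state machine (sentinel dot, inner zero loop, [:-1] trim)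
-- by an idiomatic split / pad-each-octet / join; return values proved equal on all of Dom.

-- ===== PORT A =====
-- the loop body of A's 'for i in direccion:' (state = (direccion_ajustada, octeto_binario))
def pvStepA (st : List Char × List Char) (i : Char) : List Char × List Char :=
  if i ≠ '.' then (st.1, st.2 ++ [i])
  else if st.2.length ≠ 8 then
    (st.1 ++ ((PySem.List.pyRange 0 (8 - (st.2.length : Int)) 1).foldl
                (fun acc _ => acc ++ ['0']) []) ++ st.2 ++ ['.'], [])
  else (st.1 ++ st.2 ++ ['.'], [])

def Ajustar_direccion (direccion : String) : String :=
  let dir := direccion.toList ++ ['.']        -- direccion += '.'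
  let st := dir.foldl pvStepA ([], [])
  String.ofList (PySem.List.slice st.1 none (some (-1)))   -- [:-1]

-- ===== PORT B =====
-- octeto.rjust(8, '0') ported by hand as a left pad with '0' — exact
def pvPad (octeto : List Char) : List Char := List.replicate (8 - octeto.length) '0' ++ octeto

def Ajustar_direccion_alt (direccion : String) : String :=
  String.ofList (PySem.Chars.join ['.'] ((direccion.toList.splitOn '.').map pvPad))

-- ===== PRECONDITION & SPEC =====
def Spec_Ajustar_direccion (direccion : String) (out : String) : Prop := out = Ajustar_direccion_alt direccion
instance (direccion : String) (out : String) : Decidable (Spec_Ajustar_direccion direccion out) := by unfold Spec_Ajustar_direccion; infer_instance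

-- ===== CLAIM (what is proved, stated in full; the proofs are below) =====
def Claim_equal_Ajustar_direccion : Prop := ∀ (direccion : String), Dom_Ajustar_direccion direccion → Spec_Ajustar_direccion direccion (Ajustar_direccion direccion)

-- ===== LEMMAS AND PROOFS =====

-- both branches of A's '.'-case append the padded octet and a dot, and reset the octet
lemma pvModifyHead_id {α : Type} (l : List α) : List.modifyHead (fun x => x) l = l := by
  cases l <;> simp

lemma pvStepA_dot (adj oct : List Char) :
    pvStepA (adj, oct) '.' = (adj ++ pvPad oct ++ ['.'], []) := by
  have hz : ((8 : Int) - (oct.length : Int)).toNat = 8 - oct.length := by omega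
  by_cases h : oct.length = 8
  · simp [pvStepA, pvPad, h]
  · simp [pvStepA, pvPad, h, hz, List.append_assoc]

lemma pvStepA_ne (adj oct : List Char) (c : Char) (h : c ≠ '.') :
    pvStepA (adj, oct) c = (adj, oct ++ [c]) := by
  simp [pvStepA, h]

-- the whole loop of A, over the sentinel-terminated list, against B's split/pad/join
lemma pvLoop_eq (cs : List Char) : ∀ adj oct : List Char,
    (cs ++ ['.']).foldl pvStepA (adj, oct) =
      (adj ++ PySem.Chars.join ['.'] (((cs.splitOn '.').modifyHead (oct ++ ·)).map pvPad) ++ ['.'], []) := by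
  induction cs with
  | nil =>
    intro adj oct
    simp [pvStepA_dot, List.splitOn, List.splitOnP, List.splitOnP.go, PySem.Chars.join_singleton]
  | cons c rest ih =>
    intro adj oct
    by_cases h : c = '.'
    · subst h
      obtain ⟨p, ps, hp⟩ := List.exists_cons_of_ne_nil (List.splitOnP_ne_nil (· == '.') rest)
      simp only [List.cons_append, List.foldl_cons, pvStepA_dot, ih]
      simp only [List.splitOn] at hp ⊢
      rw [List.splitOnP_cons]
      simp [hp, PySem.Chars.join_cons_cons, List.append_assoc]
    · simp only [List.cons_append, List.foldl_cons, pvStepA_ne adj oct c h, ih]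
      simp only [List.splitOn, List.splitOnP_cons, beq_iff_eq, if_neg h,
        List.modifyHead_modifyHead]
      have : ((fun x => oct ++ x) ∘ List.cons c) = (fun x => (oct ++ [c]) ++ x) := by
        funext x; simp
      rw [this]

-- ===== VERDICT (by name: the statement is the Claim_ definition above) =====
theorem Ajustar_direccion_spec : Claim_equal_Ajustar_direccion := by
  intro direccion _
  unfold Spec_Ajustar_direccion Ajustar_direccion Ajustar_direccion_alt
  simp only [pvLoop_eq]
  simp [PySem.List.slice, pvModifyHead_id]
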